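-- pv_equiv track=rewrite | github.com/Gill-Bates/wirebuddy | app/dns/custom_rules.py | _split_regex_body_and_options
-- ===== SOURCE A (Python) =====
-- def _split_regex_body_and_options(body: str) -> tuple[str, str | None] | None:
-- 	"""Split '/regex/' and optional '$options' without breaking '$' inside regex.
--
-- 	Returns (regex_literal, options_raw_or_none), or None when body is not a
-- 	proper regex-literal rule.
-- 	"""
-- 	if not body.startswith("/"):
-- 		return None
--
-- 	escaped = False
-- 	closing_index = -1
-- 	for idx, ch in enumerate(body[1:], start=1):
-- 		if escaped:
-- 			escaped = False
-- 			continue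
-- 		if ch == "\\":
-- 			escaped = True
-- 			continue
-- 		if ch == "/":
-- 			closing_index = idx
-- 			break
--
-- 	if closing_index <= 0:
-- 		return None
--
-- 	regex_literal = body[:closing_index + 1]
-- 	suffix = body[closing_index + 1:]
-- 	if not suffix:
-- 		return regex_literal, None
-- 	if not suffix.startswith("$"):
-- 		return None
-- 	return regex_literal, suffix[1:]
-- ===== SOURCE B (Python) =====
-- def _split_regex_body_and_options(body):
--     """Split '/regex/' and optional '$options' by consuming token pairs
--     ('\\'+char or a single char) recursively-style with explicit slicing."""
--     if not body.startswith("/"):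
--         return None
--     rest = body[1:]
--     regex_chars = []
--     while True:
--         if not rest:
--             return None          # no unescaped closing slash
--         c = rest[0]
--         if c == "\\":
--             if len(rest) < 2:
--                 return None      # trailing backslash, cannot close
--             regex_chars.append(rest[:2])
--             rest = rest[2:]
--         elif c == "/":
--             rest = rest[1:]
--             break
--         else:
--             regex_chars.append(c)
--             rest = rest[1:]
--     regex_literal = "/" + "".join(regex_chars) + "/"
--     if rest == "":
--         return regex_literal, None
--     if rest[0] != "$":
--         return None
--     return regex_literal, rest[1:]
-- ===== Notes on version B (the rewrite author's own statement) =====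
-- stated objective: alternative
-- what changed: Replaces the indexed escape-flag scan (enumerate + closing_index + slicing the original string) with a tokenizer that consumes the tail pairwise ('\'+char or one char), accumulating the regex characters and the remaining suffix directly, so no index bookkeeping or re-slicing of body is needed.
import Mathlib
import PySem

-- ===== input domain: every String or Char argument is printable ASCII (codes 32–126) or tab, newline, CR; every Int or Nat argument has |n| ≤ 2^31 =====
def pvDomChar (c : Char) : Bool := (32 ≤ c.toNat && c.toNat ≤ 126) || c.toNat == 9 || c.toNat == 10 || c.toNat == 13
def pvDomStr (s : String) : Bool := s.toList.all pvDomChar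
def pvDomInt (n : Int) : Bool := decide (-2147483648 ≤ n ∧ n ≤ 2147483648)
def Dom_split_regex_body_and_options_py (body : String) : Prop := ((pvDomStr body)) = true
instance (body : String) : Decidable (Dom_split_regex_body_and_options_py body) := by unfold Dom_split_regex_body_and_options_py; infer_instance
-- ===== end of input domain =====

-- B replaces A's indexed escape-flag scan with a pairwise tokenizer; objective: alternative (same cost).

-- ===== PORT A =====
-- A's for-loop with break: recursion over the enumerated tail carrying the 'escaped' flag,
-- returning the closing index (or the sentinel -1 A initialises).
def pvA_findClose : List (Int × Char) → Bool → Int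
  | [], _ => -1
  | (idx, ch) :: rest, escaped =>
    if escaped then pvA_findClose rest false
    else if ch = '\\' then pvA_findClose rest true
    else if ch = '/' then idx
    else pvA_findClose rest false

def split_regex_body_and_options_py (body : String) : Option (String × Option String) :=
  if ¬ PySem.Str.startswith body "/" then none
  else
    let closing := pvA_findClose (PySem.List.enumerate (PySem.Str.slice body (some 1) none).toList 1) false
    if closing ≤ 0 then none
    else
      let regex_literal := PySem.Str.slice body none (some (closing + 1))
      let suffix := PySem.Str.slice body (some (closing + 1)) none
      if suffix.toList = [] then some (regex_literal, none)
      else if ¬ PySem.Str.startswith suffix "$" then none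
      else some (regex_literal, some (PySem.Str.slice suffix (some 1) none))

-- ===== PORT B =====
-- B's while-loop: consume '\'+char pairs or single chars; return (regex chars, suffix after the close).
def pvB_scan : List Char → Option (List Char × List Char)
  | [] => none
  | c :: rest =>
    if c = '\\' then
      match rest with
      | [] => none
      | d :: rest2 => (pvB_scan rest2).map (fun p => (c :: d :: p.1, p.2))
    else if c = '/' then some ([], rest)
    else (pvB_scan rest).map (fun p => (c :: p.1, p.2))

def split_regex_body_and_options_py_alt (body : String) : Option (String × Option String) :=
  match body.toList with
  | '/' :: tail =>
    match pvB_scan tail with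
    | none => none
    | some (r, s) =>
      let regex_literal := String.ofList ('/' :: r ++ ['/'])
      match s with
      | [] => some (regex_literal, none)
      | '$' :: opts => some (regex_literal, some (String.ofList opts))
      | _ => none
  | _ => none

-- ===== PRECONDITION & SPEC =====
def Spec_split_regex_body_and_options_py (body : String) (out : Option (String × Option String)) : Prop := out = split_regex_body_and_options_py_alt body
instance (body : String) (out : Option (String × Option String)) : Decidable (Spec_split_regex_body_and_options_py body out) := by unfold Spec_split_regex_body_and_options_py; infer_instance

-- ===== CLAIM (what is proved, stated in full; the proofs are below) =====
def Claim_equal_split_regex_body_and_options_py : Prop := ∀ (body : String), Dom_split_regex_body_and_options_py body → Spec_split_regex_body_and_options_py body (split_regex_body_and_options_py body)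

-- ===== LEMMAS AND PROOFS =====

-- B's tokenizer vs A's closing-index search, over the same tail enumerated from idx:
-- scan failure is exactly the sentinel -1, and a successful scan fixes the closing index
-- and the decomposition of the tail.
theorem pvScan_findClose (l : List Char) : ∀ (idx : Int),
    (pvB_scan l = none → pvA_findClose (PySem.List.enumerate l idx) false = -1) ∧
    (∀ r s, pvB_scan l = some (r, s) →
      pvA_findClose (PySem.List.enumerate l idx) false = idx + r.length ∧ l = r ++ '/' :: s) := by
  induction l using pvB_scan.induct with
  | case1 =>
    intro idx
    refine ⟨fun _ => ?_, fun r s h => ?_⟩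
    · simp [PySem.List.enumerate_nil, pvA_findClose]
    · rw [pvB_scan.eq_def] at h; simp at h
  | case2 =>
    intro idx
    refine ⟨fun _ => ?_, fun r s h => ?_⟩
    · simp [PySem.List.enumerate_cons, PySem.List.enumerate_nil, pvA_findClose]
    · rw [pvB_scan.eq_def] at h; simp at h
  | case3 d rest2 ih =>
    intro idx
    rcases hscan : pvB_scan rest2 with _ | ⟨r2, s2⟩
    · refine ⟨fun _ => ?_, fun r s h => ?_⟩
      · have := (ih (idx + 2)).1 hscan
        simp only [PySem.List.enumerate_cons, pvA_findClose, Bool.false_eq_true,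
          ite_false, ite_true] at this ⊢
        rw [show idx + 1 + 1 = idx + 2 by ring]
        exact this
      · rw [pvB_scan.eq_def] at h; simp [hscan] at h
    · obtain ⟨hfc, hsplit⟩ := (ih (idx + 2)).2 r2 s2 hscan
      refine ⟨fun h => ?_, fun r s h => ?_⟩
      · rw [pvB_scan.eq_def] at h; simp [hscan] at h
      · rw [pvB_scan.eq_def] at h
        simp [hscan] at h
        obtain ⟨h1, h2⟩ := h
        subst h1; subst h2
        refine ⟨?_, by simp [hsplit]⟩
        simp only [PySem.List.enumerate_cons, pvA_findClose, Bool.false_eq_true,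
          ite_false, ite_true]
        rw [show idx + 1 + 1 = idx + 2 by ring, hfc]
        simp
        ring
  | case4 rest2 hne =>
    intro idx
    refine ⟨fun h => ?_, fun r s h => ?_⟩
    · rw [pvB_scan.eq_def] at h; simp at h
    · rw [pvB_scan.eq_def] at h
      simp at h
      obtain ⟨h1, h2⟩ := h
      subst h1; subst h2
      simp [PySem.List.enumerate_cons, pvA_findClose]
  | case5 d rest2 h1 h2 ih =>
    intro idx
    rcases hscan : pvB_scan rest2 with _ | ⟨r2, s2⟩
    · refine ⟨fun _ => ?_, fun r s h => ?_⟩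
      · have := (ih (idx + 1)).1 hscan
        simp only [PySem.List.enumerate_cons, pvA_findClose, if_neg h1, if_neg h2,
          Bool.false_eq_true, ite_false] at this ⊢
        exact this
      · rw [pvB_scan.eq_def] at h; simp [hscan, h1, h2] at h
    · obtain ⟨hfc, hsplit⟩ := (ih (idx + 1)).2 r2 s2 hscan
      refine ⟨fun h => ?_, fun r s h => ?_⟩
      · rw [pvB_scan.eq_def] at h; simp [hscan, h1, h2] at h
      · rw [pvB_scan.eq_def] at h
        simp [hscan, h1, h2] at h
        obtain ⟨h3, h4⟩ := h
        subst h3; subst h4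
        refine ⟨?_, by simp [hsplit]⟩
        simp only [PySem.List.enumerate_cons, pvA_findClose, if_neg h1, if_neg h2,
          Bool.false_eq_true, ite_false]
        rw [hfc]
        simp
        ring

-- ===== VERDICT (by name: the statement is the Claim_ definition above) =====
theorem split_regex_body_and_options_py_spec : Claim_equal_split_regex_body_and_options_py := by
  intro body _
  unfold Spec_split_regex_body_and_options_py split_regex_body_and_options_py
    split_regex_body_and_options_py_alt
  have hslash : "/".toList = ['/'] := rfl
  have hdollar : "$".toList = ['$'] := rfl
  rcases hl : body.toList with _ | ⟨c, tail⟩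
  · have hsw : PySem.Chars.startswith ([] : List Char) ['/'] = false := by decide
    simp [hl, hslash, hsw]
  · by_cases hc : c = '/'
    case neg =>
      have hsw : PySem.Chars.startswith (c :: tail) ['/'] = false := by
        by_contra hh
        rw [Bool.not_eq_false, PySem.Chars.startswith_iff, List.cons_prefix_cons] at hh
        exact hc hh.1.symm
      simp only [PySem.Str.startswith_eq, hl, hslash, hsw]
      rw [if_pos (by decide)]
      split
      · next heq => injection heq with hce _; exact absurd hce hc
      · rfl
    case pos =>
      subst hc
      have hsw : PySem.Chars.startswith ('/' :: tail) ['/'] = true := by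
        rw [PySem.Chars.startswith_iff, List.cons_prefix_cons]
        exact ⟨rfl, List.nil_prefix⟩
      have htail : PySem.List.slice ('/' :: tail) (some 1) none = tail := by
        rw [PySem.List.slice_from _ (by norm_num)]
        rfl
      rcases hscan : pvB_scan tail with _ | ⟨r, s⟩
      · have hfc := (pvScan_findClose tail 1).1 hscan
        simp [hl, hslash, hsw, htail, hfc, hscan]
      · obtain ⟨hfc, hsplit⟩ := (pvScan_findClose tail 1).2 r s hscan
        have hb2 : (1 : Int) + (r.length : Int) + 1 = ((r.length + 2 : Nat) : Int) := by
          push_cast; ring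
        have hdecomp : '/' :: tail = ('/' :: r ++ ['/']) ++ s := by simp [hsplit]
        have hlen2 : r.length + 2 = ('/' :: r ++ ['/'] : List Char).length := by simp
        have hsuf : PySem.List.slice ('/' :: tail) (some ((1 : Int) + (r.length : Int) + 1)) none
            = s := by
          rw [hb2, PySem.List.slice_from_natCast, hdecomp, hlen2]
          exact List.drop_left
        have hregS : PySem.Str.slice body none (some ((1 : Int) + (r.length : Int) + 1))
            = String.ofList ('/' :: r ++ ['/']) := by
          apply String.toList_inj.mp
          rw [String.toList_ofList, PySem.Str.toList_slice, PySem.Chars.slice_eq_listSlice, hl,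
            hb2, PySem.List.slice_to_natCast, hdecomp, hlen2]
          exact List.take_left
        have hpos : ¬ ((1 : Int) + (r.length : Int) ≤ 0) := by omega
        simp only [PySem.Str.startswith_eq, PySem.Str.toList_slice,
          PySem.Chars.slice_eq_listSlice, hl, hslash, hdollar, hsw, htail, hfc, hscan]
        rw [if_neg (by decide), if_neg hpos, hsuf, hregS]
        rcases s with _ | ⟨c2, opts⟩
        · rw [if_pos rfl]
        · rw [if_neg (by simp)]
          have hds : (PySem.Str.slice body (some ((1 : Int) + (r.length : Int) + 1)) none).toList
              = c2 :: opts := by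
            rw [PySem.Str.toList_slice, PySem.Chars.slice_eq_listSlice, hl, hsuf]
          by_cases hc2 : c2 = '$'
          · subst hc2
            have hsw2 : PySem.Chars.startswith ('$' :: opts) ['$'] = true := by
              rw [PySem.Chars.startswith_iff, List.cons_prefix_cons]
              exact ⟨rfl, List.nil_prefix⟩
            have hoptS : PySem.Str.slice (PySem.Str.slice body (some ((1 : Int) + (r.length : Int) + 1)) none) (some 1) none
                = String.ofList opts := by
              apply String.toList_inj.mp
              rw [String.toList_ofList, PySem.Str.toList_slice, PySem.Chars.slice_eq_listSlice,
                hds, PySem.List.slice_from _ (by norm_num)]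
              rfl
            rw [hsw2, if_neg (by decide), hoptS]
            rfl
          · have hsw2 : PySem.Chars.startswith (c2 :: opts) ['$'] = false := by
              by_contra hh
              rw [Bool.not_eq_false, PySem.Chars.startswith_iff, List.cons_prefix_cons] at hh
              exact hc2 hh.1.symm
            rw [hsw2, if_pos (by decide)]
            split
            · next heq => simp at heq
            · next heq => injection heq with hce _; exact absurd hce hc2
            · rfl
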